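-- pv_equiv track=rewrite | github.com/Xrlm-8/XorToPython | main.py | calculo_xor
-- ===== SOURCE A (Python) =====
-- def calculo_xor(str_decoded):
--     index = 0
--     array = []
--     while index < len(str_decoded):
--         percorre = slice(index,index + 2)
--         res = str_decoded[percorre]
--         index = index + 2
--         array.append(int(res, base=16))
--     pegar_checksum = array.pop()
--     hex_chec = hex(pegar_checksum)
--
--     def calcXor(array):
--         res = 0
--         i = 0
--         while i < len(array):
--             res = res ^ array[i]
--             i = i + 1
--         return res
--     res = calcXor(array)
--     check = res ^ 0xff
--     checksum = hex(check)
--     var = {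
--         'hex_chec': hex_chec,
--         'checksum': checksum
--     }
--     return var
-- ===== SOURCE B (Python) =====
-- def calculo_xor(str_decoded):
--     acc = 0
--     last = None
--     for index in range(0, len(str_decoded), 2):
--         v = int(str_decoded[index:index + 2], base=16)
--         acc ^= v
--         last = v
--     if last is None:
--         raise IndexError('pop from empty list')
--     return {
--         'hex_chec': hex(last),
--         'checksum': hex((acc ^ last) ^ 0xff),
--     }
-- ===== Notes on version B (the rewrite author's own statement) =====
-- stated objective: faster
-- what changed: single pass keeping a running XOR and the most recent parsed byte instead of building the byte list, popping the checksum and XOR-ing the list in a second loop; the checksum byte is removed from the accumulator by XOR self-inverse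
import Mathlib
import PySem

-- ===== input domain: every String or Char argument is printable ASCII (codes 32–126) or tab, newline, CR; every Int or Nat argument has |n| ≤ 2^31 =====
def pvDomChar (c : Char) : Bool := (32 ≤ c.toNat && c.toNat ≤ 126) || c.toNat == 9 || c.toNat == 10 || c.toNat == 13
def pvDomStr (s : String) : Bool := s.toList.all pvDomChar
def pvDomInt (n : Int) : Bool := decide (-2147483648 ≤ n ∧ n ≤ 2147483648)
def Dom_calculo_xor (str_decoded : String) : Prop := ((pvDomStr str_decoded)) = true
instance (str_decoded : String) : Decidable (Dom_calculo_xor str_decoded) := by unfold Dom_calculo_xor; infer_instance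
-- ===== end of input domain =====

-- B replaces A's build-list / pop / second-XOR-loop scheme by a single pass keeping a running
-- XOR and the last parsed byte (the checksum byte is removed from the accumulator by XOR
-- self-inverse); return values are proved equal on every input where A returns.

-- hex(n): "0x" + lowercase hex digits, "-0x…" for negatives (shared: both Pythons call hex())
def pvHexDigits : Nat → List Char
  | 0 => []
  | n + 1 => pvHexDigits ((n + 1) / 16) ++ [Nat.digitChar ((n + 1) % 16)]
decreasing_by exact Nat.div_lt_self (Nat.succ_pos n) (by omega)

def pvHex (n : Int) : String :=
  let digs := if n.natAbs = 0 then ['0'] else pvHexDigits n.natAbs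
  if n < 0 then String.mk ('-' :: '0' :: 'x' :: digs) else String.mk ('0' :: 'x' :: digs)

-- ===== PORT A =====
-- A's first while loop: take two characters at a time, int(chunk, 16); none = ValueError
def pvParseA : List Char → Option (List Int)
  | [] => some []
  | [a] => (PySem.Int.ofCharsBase? [a] 16).map (fun v => [v])
  | a :: b :: rest =>
    match PySem.Int.ofCharsBase? [a, b] 16 with
    | none => none
    | some v => (pvParseA rest).map (fun arr => v :: arr)

def calculo_xor (str_decoded : String) : List (String × String) :=
  match pvParseA str_decoded.toList with
  | none => []                                   -- ValueError in Python (outside Pre_)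
  | some array =>
    match PySem.List.pop? array (-1) with
    | none => []                                 -- IndexError on empty (outside Pre_)
    | some (pegar_checksum, rest) =>
      let hex_chec := pvHex pegar_checksum
      let res := rest.foldl PySem.Int.bxor 0     -- calcXor's while loop
      let check := PySem.Int.bxor res 255
      let checksum := pvHex check
      [("hex_chec", hex_chec), ("checksum", checksum)]

-- ===== PORT B =====
-- B's single loop: running XOR accumulator and the most recent parsed value
def pvLoopB : List Char → Int → Option Int → Option (Int × Option Int)
  | [], acc, last => some (acc, last)
  | [a], acc, _ => (PySem.Int.ofCharsBase? [a] 16).map (fun v => (PySem.Int.bxor acc v, some v))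
  | a :: b :: rest, acc, _ =>
    match PySem.Int.ofCharsBase? [a, b] 16 with
    | none => none
    | some v => pvLoopB rest (PySem.Int.bxor acc v) (some v)

def calculo_xor_alt (str_decoded : String) : List (String × String) :=
  match pvLoopB str_decoded.toList 0 none with
  | some (acc, some last) =>
    [("hex_chec", pvHex last), ("checksum", pvHex (PySem.Int.bxor (PySem.Int.bxor acc last) 255))]
  | _ => []                                      -- ValueError / IndexError in Python (outside Pre_)

-- ===== PRECONDITION & SPEC =====
-- the two-character chunks A slices out (used only by Pre_)
def pvChunks : List Char → List (List Char)
  | [] => []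
  | [a] => [[a]]
  | a :: b :: rest => [a, b] :: pvChunks rest

-- Pre_ excludes exactly the inputs where A raises: the empty string (IndexError from pop())
-- and strings with a chunk int(·, 16) rejects (ValueError).
def Pre_calculo_xor (str_decoded : String) : Prop :=
  str_decoded.toList ≠ [] ∧
  ∀ c ∈ pvChunks str_decoded.toList, (PySem.Int.ofCharsBase? c 16).isSome

instance (str_decoded : String) : Decidable (Pre_calculo_xor str_decoded) := by
  unfold Pre_calculo_xor; infer_instance

def pvWitness_calculo_xor : String := "ab12"

def Spec_calculo_xor (str_decoded : String) (out : List (String × String)) : Prop :=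
  out = calculo_xor_alt str_decoded
instance (str_decoded : String) (out : List (String × String)) : Decidable (Spec_calculo_xor str_decoded out) := by
  unfold Spec_calculo_xor; infer_instance

-- ===== CLAIM (what is proved, stated in full; the proofs are below) =====
def Claim_equal_calculo_xor : Prop := ∀ (str_decoded : String), Dom_calculo_xor str_decoded → Pre_calculo_xor str_decoded → Spec_calculo_xor str_decoded (calculo_xor str_decoded)

-- ===== LEMMAS AND PROOFS =====

-- XOR cancellation (from bxor's two's-complement definition, via Nat.xor_cancel_right)
theorem pv_bxor_cancel (x l : Int) : PySem.Int.bxor (PySem.Int.bxor x l) l = x := by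
  unfold PySem.Int.bxor
  split_ifs with h1 h2 h3 h4 h5 h6 h7 h8 <;>
    simp_all <;> omega

theorem pv_or_getLast? (arr : List Int) (v : Int) :
    (v :: arr).getLast? = arr.getLast?.or (some v) := by
  induction arr generalizing v with
  | nil => rfl
  | cons x t ih =>
    rw [List.getLast?_cons_cons, ih x]
    cases t.getLast? <;> simp

-- B's loop computes A's parsed list folded into the accumulator, plus its last element
theorem pv_loop_agree (cs : List Char) (acc : Int) (last : Option Int) :
    pvLoopB cs acc last =
      (pvParseA cs).map (fun arr => (arr.foldl PySem.Int.bxor acc, arr.getLast?.or last)) := by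
  induction cs using pvChunks.induct generalizing acc last with
  | case1 => simp [pvParseA, pvLoopB]
  | case2 a =>
    cases h : PySem.Int.ofCharsBase? [a] 16 <;> simp [pvParseA, pvLoopB, h]
  | case3 a b rest ih =>
    cases h : PySem.Int.ofCharsBase? [a, b] 16 with
    | none => simp [pvParseA, pvLoopB, h]
    | some v =>
      simp only [pvParseA, pvLoopB, h, ih]
      cases hr : pvParseA rest with
      | none => rfl
      | some arr =>
        simp [List.foldl_cons, pv_or_getLast?, Option.or_assoc]

-- under Pre_'s chunk condition, A's parse succeeds (nonempty input gives a nonempty list)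
theorem pv_parse_some (cs : List Char)
    (h : ∀ c ∈ pvChunks cs, (PySem.Int.ofCharsBase? c 16).isSome) :
    ∃ arr, pvParseA cs = some arr ∧ (cs ≠ [] → arr ≠ []) := by
  induction cs using pvChunks.induct with
  | case1 => exact ⟨[], rfl, fun h' => absurd rfl h'⟩
  | case2 a =>
    have ha := h [a] (by simp [pvChunks])
    obtain ⟨v, hv⟩ := Option.isSome_iff_exists.mp ha
    exact ⟨[v], by simp [pvParseA, hv], by simp⟩
  | case3 a b rest ih =>
    have hab := h [a, b] (by simp [pvChunks])
    obtain ⟨v, hv⟩ := Option.isSome_iff_exists.mp hab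
    obtain ⟨arr, harr, -⟩ := ih (fun c hc => h c (by simp [pvChunks, hc]))
    exact ⟨v :: arr, by simp [pvParseA, hv, harr], by simp⟩

-- ===== VERDICT (by name: the statement is the Claim_ definition above) =====
theorem calculo_xor_spec : Claim_equal_calculo_xor := by
  intro s _ hpre
  obtain ⟨hne, hall⟩ := hpre
  obtain ⟨arr, harr, hnil⟩ := pv_parse_some s.toList hall
  have hnil' := hnil hne
  obtain ⟨l, xs, hxl⟩ : ∃ l xs, arr = xs ++ [l] := by
    refine ⟨arr.getLast hnil', arr.dropLast, ?_⟩
    exact (List.dropLast_append_getLast hnil').symm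
  unfold Spec_calculo_xor calculo_xor calculo_xor_alt
  rw [pv_loop_agree, harr, hxl]
  simp only [Option.map_some, PySem.List.pop?_last, List.foldl_append, List.foldl_cons,
    List.foldl_nil, List.getLast?_concat, Option.some_or]
  rw [pv_bxor_cancel]
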